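-- pv_equiv track=rewrite | github.com/ihni/movie-sys | app/src/models/theatres/theatre.py | get_seat_position
-- ===== SOURCE A (Python) =====
-- def get_seat_position(seat_name):
--     row_part = ''.join(filter(str.isalpha, seat_name))
--     column_part = ''.join(filter(str.isdigit, seat_name))
--     column = int(column_part) - 1
--
--     row = 0
--     for index, char in enumerate(reversed(row_part)):
--         row += (ord(char) - ord('A')) * (26 ** index)
--     return row, column
-- ===== SOURCE B (Python) =====
-- def get_seat_position(seat_name):
--     # One pass, Horner's rule for the base-26 row; digits collected along the way.
--     row = 0
--     digits = []
--     for ch in seat_name: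
--         if ch.isalpha():
--             row = row * 26 + (ord(ch) - ord('A'))
--         elif ch.isdigit():
--             digits.append(ch)
--     return row, int(''.join(digits)) - 1
-- ===== Notes on version B (the rewrite author's own statement) =====
-- stated objective: simpler
-- what changed: Replaces the two filter passes plus a reversed enumerate loop with 26**index power terms by a single forward pass that accumulates the row with Horner's rule (row = row*26 + digit) and collects the column digits in the same loop.
import Mathlib
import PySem

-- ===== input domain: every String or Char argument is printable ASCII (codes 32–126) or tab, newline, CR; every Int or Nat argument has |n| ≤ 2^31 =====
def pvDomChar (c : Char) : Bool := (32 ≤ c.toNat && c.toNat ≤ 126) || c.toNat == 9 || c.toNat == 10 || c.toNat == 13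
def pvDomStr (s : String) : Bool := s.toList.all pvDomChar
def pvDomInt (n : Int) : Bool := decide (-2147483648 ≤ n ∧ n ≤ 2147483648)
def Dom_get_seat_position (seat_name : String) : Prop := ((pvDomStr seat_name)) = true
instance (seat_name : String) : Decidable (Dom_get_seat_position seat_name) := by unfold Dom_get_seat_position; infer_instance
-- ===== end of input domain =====

-- B replaces A's two filter passes and reversed 26**index power loop by one forward pass
-- using Horner's rule; same return value on every input where A returns (Pre_: a digit exists).


-- ===== PORT A =====
def get_seat_position (seat_name : String) : Int × Int :=
  let row_part := seat_name.toList.filter PySem.Chars.isalpha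
  let column_part := seat_name.toList.filter PySem.Chars.isdigit
  let column := (PySem.Int.ofChars? column_part).getD 0 - 1   -- int of the digits: none (ValueError) excluded by Pre_
  let row := (PySem.List.enumerate row_part.reverse).foldl
    (fun r p => r + ((p.2.toNat : Int) - 65) * 26 ^ p.1.toNat) 0
  (row, column)

-- ===== PORT B =====
def get_seat_position_alt (seat_name : String) : Int × Int :=
  let st := seat_name.toList.foldl
    (fun (st : Int × List Char) ch =>
      if PySem.Chars.isalpha ch then (st.1 * 26 + ((ch.toNat : Int) - 65), st.2)
      else if PySem.Chars.isdigit ch then (st.1, st.2 ++ [ch])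
      else st)
    (0, [])
  (st.1, (PySem.Int.ofChars? st.2).getD 0 - 1)   -- int of the digits: none (ValueError) excluded by Pre_

-- ===== PRECONDITION & SPEC =====
-- Pre_ excludes inputs with no digit character, where both Pythons raise ValueError when converting the collected digits to an int.
def Pre_get_seat_position (seat_name : String) : Prop :=
  seat_name.toList.filter PySem.Chars.isdigit ≠ []
instance (seat_name : String) : Decidable (Pre_get_seat_position seat_name) := by unfold Pre_get_seat_position; infer_instance
def pvWitness_get_seat_position : String := "A1"

def Spec_get_seat_position (seat_name : String) (out : Int × Int) : Prop := out = get_seat_position_alt seat_name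
instance (seat_name : String) (out : Int × Int) : Decidable (Spec_get_seat_position seat_name out) := by unfold Spec_get_seat_position; infer_instance

-- ===== CLAIM (what is proved, stated in full; the proofs are below) =====
def Claim_equal_get_seat_position : Prop := ∀ (seat_name : String), Dom_get_seat_position seat_name → Pre_get_seat_position seat_name → Spec_get_seat_position seat_name (get_seat_position seat_name)

-- ===== LEMMAS AND PROOFS =====

-- An alphabetic character is never a digit (used to commute the fused pass with A's filters).
theorem alpha_not_digit (c : Char) :
    PySem.Chars.isalpha c = true → PySem.Chars.isdigit c = false := by
  simp only [PySem.Chars.isalpha, PySem.Chars.isupper, PySem.Chars.islower, PySem.Chars.isdigit,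
    Bool.or_eq_true, Bool.and_eq_true, decide_eq_true_eq, Char.le_def, UInt32.le_iff_toNat_le]
  intro h
  simp only [Bool.and_eq_false_iff, decide_eq_false_iff_not]
  have h1 : '0'.val.toNat = 48 := rfl
  have h2 : '9'.val.toNat = 57 := rfl
  have h3 : 'A'.val.toNat = 65 := rfl
  have h4 : 'Z'.val.toNat = 90 := rfl
  have h5 : 'a'.val.toNat = 97 := rfl
  have h6 : 'z'.val.toNat = 122 := rfl
  omega

-- Horner step appended on the right multiplies the accumulator by 26 and adds the new value.
theorem horner_append (l : List Char) (c : Char) (a : Int) :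
    (l ++ [c]).foldl (fun r ch => r * 26 + ((ch.toNat : Int) - 65)) a
      = (l.foldl (fun r ch => r * 26 + ((ch.toNat : Int) - 65)) a) * 26 + ((c.toNat : Int) - 65) := by
  simp [List.foldl_append]

-- A's reversed-with-powers loop equals Horner over the un-reversed list.
theorem pow_loop_eq_horner (rl : List Char) (s : Nat) (acc : Int) :
    (PySem.List.enumerate rl (s : Int)).foldl
        (fun r p => r + ((p.2.toNat : Int) - 65) * 26 ^ p.1.toNat) acc
      = acc + 26 ^ s * (rl.reverse.foldl (fun r ch => r * 26 + ((ch.toNat : Int) - 65)) 0) := by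
  induction rl generalizing s acc with
  | nil => simp [PySem.List.enumerate_nil]
  | cons c rest ih =>
    rw [PySem.List.enumerate_cons]
    simp only [List.foldl_cons]
    have hs : ((s : Int) + 1) = ((s + 1 : Nat) : Int) := by push_cast; ring
    rw [hs, ih (s + 1)]
    have hrev : (c :: rest).reverse = rest.reverse ++ [c] := by simp
    rw [hrev, horner_append]
    have hnat : ((s : Int)).toNat = s := Int.toNat_natCast s
    rw [hnat]
    ring

-- The fused single pass maintains (Horner of alpha chars so far, digit chars so far).
theorem fused_invariant (l : List Char) (r : Int) (ds : List Char) :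
    l.foldl
      (fun (st : Int × List Char) ch =>
        if PySem.Chars.isalpha ch then (st.1 * 26 + ((ch.toNat : Int) - 65), st.2)
        else if PySem.Chars.isdigit ch then (st.1, st.2 ++ [ch])
        else st)
      (r, ds)
    = ((l.filter PySem.Chars.isalpha).foldl (fun a ch => a * 26 + ((ch.toNat : Int) - 65)) r,
       ds ++ l.filter PySem.Chars.isdigit) := by
  induction l generalizing r ds with
  | nil => simp
  | cons c rest ih =>
    by_cases ha : PySem.Chars.isalpha c = true
    · simp [ha, alpha_not_digit c ha, ih]
    · by_cases hd : PySem.Chars.isdigit c = true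
      · simp [ha, hd, ih]
      · simp [ha, hd, ih]

-- ===== VERDICT (by name: the statement is the Claim_ definition above) =====
theorem get_seat_position_spec : Claim_equal_get_seat_position := by
  intro s _ _
  unfold Spec_get_seat_position get_seat_position get_seat_position_alt
  have hA := pow_loop_eq_horner (s.toList.filter PySem.Chars.isalpha).reverse 0 0
  simp only [Nat.cast_zero, pow_zero, one_mul, zero_add, List.reverse_reverse] at hA
  simp only [fused_invariant, hA, List.nil_append]
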